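-- pv_equiv track=rewrite | github.com/vovakirdan/tableshark | tableshark/main.py | _repeating_map
-- ===== SOURCE A (Python) =====
-- def _repeating_map(map_blocks: list[list[int]]) -> list[list[int]]:
--     out = [[] for _ in map_blocks]
--     for i, row in enumerate(map_blocks):
--         if i == len(map_blocks) - 1:
--             out[i].extend([0 for _ in range(len(map_blocks[-1]))])
--             break  # stop if it is last row
--         next_row = map_blocks[-1]
--         # next_row_lim = len(next_row)
--         pos = 0
--         for r1 in row:
--             r2 = next_row[pos]
--             n = 0
--             if r1 == r2:
--                 out[i].append(n)
--             else:
--                 while r1 != r2: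
--                     n += 1
--                     r2 += next_row[pos + 1] + 1
--                     pos += 1
--                 out[i].append(n)
--             pos += 1
--     return out
-- ===== SOURCE B (Python) =====
-- def _repeating_map(map_blocks: list[list[int]]) -> list[list[int]]:
--     if not map_blocks:
--         return []
--     last = map_blocks[-1]
--     # cumulative table of the last row: T[0]=0, T[m+1]=T[m]+last[m]+1
--     T = [0]
--     for v in last:
--         T.append(T[-1] + v + 1)
--     out = []
--     for row in map_blocks[:-1]:
--         s = 0
--         p = 0
--         cur = []
--         for r1 in row:
--             s += r1 + 1
--             m = T.index(s, p + 1)   # first position after p whose cumulative value matches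
--             cur.append(m - p - 1)
--             p = m
--         out.append(cur)
--     out.append([0] * len(last))
--     return out
-- ===== Notes on version B (the rewrite author's own statement) =====
-- stated objective: alternative
-- what changed: B precomputes the cumulative table T of the last row once and turns A's incremental two-pointer while-loop into a running prefix sum of the row plus a first-index search T.index(s, p+1); the inner difference-chasing loop of A disappears.
import Mathlib
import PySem

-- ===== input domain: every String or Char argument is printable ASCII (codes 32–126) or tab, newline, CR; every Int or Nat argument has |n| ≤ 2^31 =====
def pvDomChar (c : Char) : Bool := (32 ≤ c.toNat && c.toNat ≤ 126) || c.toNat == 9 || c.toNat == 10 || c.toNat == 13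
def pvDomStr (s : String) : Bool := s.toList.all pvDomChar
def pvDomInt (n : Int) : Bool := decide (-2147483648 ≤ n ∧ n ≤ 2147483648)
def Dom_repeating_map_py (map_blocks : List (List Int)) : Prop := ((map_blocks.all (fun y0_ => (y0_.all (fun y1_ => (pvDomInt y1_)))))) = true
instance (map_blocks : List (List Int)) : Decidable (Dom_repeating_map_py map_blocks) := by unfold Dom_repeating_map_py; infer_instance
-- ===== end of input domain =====

-- B replaces A's incremental two-pointer while-loop by a precomputed cumulative table of the
-- last row plus a first-index search per row value (alternative decomposition, same cost).


-- ===== PORT A =====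
-- the inner 'while r1 != r2' loop; fuel = len(next_row)+1 is enough whenever Python's loop
-- terminates without raising (pos only increments and raises past the end); Pre_ excludes the raise
def pyA_while (next_row : List Int) (r1 : Int) : Int → Int → Int → Nat → Int × Int
  | _, n, pos, 0 => (n, pos)
  | r2, n, pos, fuel+1 =>
    if r1 = r2 then (n, pos)
    else pyA_while next_row r1 (r2 + PySem.List.pyGetD next_row (pos+1) 0 + 1) (n+1) (pos+1) fuel

-- the 'for r1 in row' loop of A, appending to out[i] (acc); next_row[pos] via pyGetD, in range under Pre_
def pyA_row (next_row : List Int) (fuel : Nat) : List Int → Int → List Int → List Int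
  | [], _, acc => acc
  | r1 :: rs, pos, acc =>
    let r2 := PySem.List.pyGetD next_row pos 0
    if r1 = r2 then pyA_row next_row fuel rs (pos + 1) (acc ++ [0])
    else
      let nr := pyA_while next_row r1 r2 0 pos fuel
      pyA_row next_row fuel rs (nr.2 + 1) (acc ++ [nr.1])

-- 'for i, row in enumerate(map_blocks)' with the last-row branch and break
def repA_go (next_row : List Int) : List (List Int) → List (List Int)
  | [] => []
  | [_] => [List.replicate next_row.length 0]
  | row :: rest => pyA_row next_row (next_row.length + 1) row 0 [] :: repA_go next_row rest

def repeating_map_py (map_blocks : List (List Int)) : List (List Int) :=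
  match map_blocks with
  | [] => []
  | _ => repA_go (PySem.List.pyGetD map_blocks (-1) []) map_blocks

-- ===== PORT B =====
-- T = [0]; for v in last: T.append(T[-1] + v + 1)
def buildT (t : Int) : List Int → List Int
  | [] => [t]
  | v :: vs => t :: buildT (t + v + 1) vs

-- per-row loop of B; 'T.index(s, p+1)' (first index ≥ p+1 with that value) is ported by hand as
-- index? on T.drop (p+1) shifted back by p+1 — exact, since p+1 ≥ 0; none = ValueError (outside Pre_)
def pyB_row (T : List Int) : List Int → Int → Nat → List Int
  | [], _, _ => []
  | r1 :: rs, s, p =>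
    let s' := s + r1 + 1
    match PySem.List.index? (T.drop (p+1)) s' with
    | none => []
    | some k => (((p + 1 + k : Nat) : Int) - (p : Int) - 1) :: pyB_row T rs s' (p + 1 + k)

def repeating_map_py_alt (map_blocks : List (List Int)) : List (List Int) :=
  match map_blocks.getLast? with
  | none => []
  | some last =>
    let T := buildT 0 last
    map_blocks.dropLast.map (fun row => pyB_row T row 0 0) ++ [List.replicate last.length 0]

-- ===== PRECONDITION & SPEC =====
-- Pre_ excludes exactly the inputs where Python A raises IndexError (its pointer walks past the
-- end of the last row because some row value has no matching group): a row is admitted iff its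
-- running totals s (each value +1, summed) occur in order, each strictly later than the previous
-- match, in the cumulative table of the last row.
-- cumulative value of the last row up to position m: sum of (v+1) over its first m entries
def pvCum (L : List Int) (m : Nat) : Int := ((L.take m).map (fun v => v + 1)).sum

-- a row matches iff each running total s occurs as a cumulative value of the last row at some
-- position strictly after the previous match (find? picks the first such position)
def rowMatches (last : List Int) : List Int → Int → Nat → Bool
  | [], _, _ => true
  | r1 :: rs, s, p =>
    match (List.range' (p+1) (last.length - p)).find? (fun m => pvCum last m = s + r1 + 1) with
    | none => false
    | some m => rowMatches last rs (s + r1 + 1) m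

def Pre_repeating_map_py (map_blocks : List (List Int)) : Prop :=
  ∀ row ∈ map_blocks.dropLast,
    rowMatches ((map_blocks.getLast?).getD []) row 0 0 = true

instance (map_blocks : List (List Int)) : Decidable (Pre_repeating_map_py map_blocks) := by
  unfold Pre_repeating_map_py; infer_instance

def pvWitness_repeating_map_py : List (List Int) := [[2, 2], [0, 1, 0, 1]]

def Spec_repeating_map_py (map_blocks : List (List Int)) (out : List (List Int)) : Prop := out = repeating_map_py_alt map_blocks
instance (map_blocks : List (List Int)) (out : List (List Int)) : Decidable (Spec_repeating_map_py map_blocks out) := by unfold Spec_repeating_map_py; infer_instance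

-- ===== CLAIM (what is proved, stated in full; the proofs are below) =====
def Claim_equal_repeating_map_py : Prop := ∀ (map_blocks : List (List Int)), Dom_repeating_map_py map_blocks → Pre_repeating_map_py map_blocks → Spec_repeating_map_py map_blocks (repeating_map_py map_blocks)

-- ===== LEMMAS AND PROOFS =====

theorem length_buildT (t : Int) (L : List Int) : (buildT t L).length = L.length + 1 := by
  induction L generalizing t with
  | nil => rfl
  | cons v vs ih => simp [buildT, ih]

theorem buildT_getD_zero (t : Int) (L : List Int) (d : Int) : (buildT t L).getD 0 d = t := by
  cases L <;> rfl

theorem buildT_step (t : Int) (L : List Int) (p : Nat) (hp : p < L.length) (d : Int) :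
    (buildT t L).getD (p+1) d = (buildT t L).getD p d + L.getD p d + 1 := by
  induction L generalizing t p with
  | nil => simp at hp
  | cons v vs ih =>
    cases p with
    | zero =>
      show (t :: buildT (t+v+1) vs).getD 1 d = (t :: buildT (t+v+1) vs).getD 0 d + (v::vs).getD 0 d + 1
      rw [List.getD_cons_succ, List.getD_cons_zero, List.getD_cons_zero, buildT_getD_zero]
    | succ q => simpa [buildT] using ih (t + v + 1) q (by simpa using hp)

theorem pvCum_succ (L : List Int) (m : Nat) (h : m < L.length) :
    pvCum L (m+1) = pvCum L m + L.getD m 0 + 1 := by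
  have ht : L.take (m+1) = L.take m ++ [L[m]] := by
    rw [List.take_add_one]
    simp [List.getElem?_eq_getElem h]
  unfold pvCum
  rw [ht, List.getD_eq_getElem L 0 h, List.map_append, List.sum_append]
  simp [add_assoc]

theorem pvCum_eq_buildT (L : List Int) (m : Nat) (hm : m ≤ L.length) :
    pvCum L m = (buildT 0 L).getD m 0 := by
  induction m with
  | zero => rw [buildT_getD_zero]; rfl
  | succ q ih =>
    rw [pvCum_succ L q (by omega), buildT_step 0 L q (by omega), ih (by omega)]

-- the first cumulative match after p is index? on the cumulative table's tail, shifted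
theorem find?_eq_index? (last : List Int) (v : Int) : ∀ (c p : Nat), c = last.length - p →
    p ≤ last.length →
    (List.range' (p+1) c).find? (fun m => pvCum last m = v)
      = (PySem.List.index? ((buildT 0 last).drop (p+1)) v).map (fun k => p + 1 + k) := by
  intro c
  induction c with
  | zero =>
    intro p hc hp
    have hp' : p = last.length := by omega
    have : (buildT 0 last).drop (p+1) = [] := by
      apply List.drop_eq_nil_of_le
      rw [length_buildT]; omega
    simp [this, PySem.List.index?]
  | succ c ih =>
    intro p hc hp
    have hplt : p < last.length := by omega
    have hlenT : (buildT 0 last).length = last.length + 1 := length_buildT 0 last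
    have hdrop : (buildT 0 last).drop (p+1)
        = (buildT 0 last)[p+1]'(by omega) :: (buildT 0 last).drop (p+2) :=
      List.drop_eq_getElem_cons (by omega)
    have hTp1 : (buildT 0 last)[p+1]'(by omega) = pvCum last (p+1) := by
      rw [← List.getD_eq_getElem _ 0 (by omega), pvCum_eq_buildT last (p+1) (by omega)]
    rw [List.range'_succ, hdrop, hTp1]
    by_cases hv : pvCum last (p+1) = v
    · rw [List.find?_cons_of_pos (h := by simp [hv]), hv, PySem.List.index?_cons_self]
      simp
    · rw [List.find?_cons_of_neg (h := by simp [hv]), PySem.List.index?_cons_of_ne _ hv]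
      have hrec := ih (p+1) (by omega) (by omega)
      rw [show p+1+1 = p+2 from rfl] at hrec
      rw [hrec, Option.map_map]
      congr 1
      funext x
      simp only [Function.comp_apply]
      omega

-- A's while loop, started at absolute T-position p0 with target value tgt, counts exactly to the
-- first later match that index? reports (invariant: r2 = T[p0+1+j] - tgt + r1 after j iterations).
theorem whileLem (last : List Int) (r1 tgt : Int) (p0 k : Nat)
    (hidx : PySem.List.index? ((buildT 0 last).drop (p0+1)) tgt = some k) :
    ∀ rem j : Nat, j + rem = k → ∀ (n : Int) (fuel : Nat), rem < fuel →
    pyA_while last r1 ((buildT 0 last).getD (p0+1+j) 0 - tgt + r1) n (((p0 + j : Nat) : Int)) fuel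
      = (n + rem, ((p0 + k : Nat) : Int)) := by
  obtain ⟨hk, hval, hfirst⟩ := PySem.List.getElem_of_index?_eq_some hidx
  have hlenT : (buildT 0 last).length = last.length + 1 := length_buildT 0 last
  have hkT : p0 + 1 + k < (buildT 0 last).length := by
    simp only [List.length_drop] at hk; omega
  intro rem
  induction rem with
  | zero =>
    intro j hj n fuel hf
    obtain ⟨fuel, rfl⟩ : ∃ f, fuel = f + 1 := ⟨fuel - 1, by omega⟩
    obtain rfl : j = k := by omega
    have heq : (buildT 0 last).getD (p0+1+j) 0 - tgt + r1 = r1 := by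
      have h2 := hval
      rw [List.getElem_drop] at h2
      have h3 : (buildT 0 last).getD (p0+1+j) 0 = tgt := by
        rw [List.getD_eq_getElem _ _ (by omega)]
        simpa using h2
      omega
    simp only [pyA_while, if_pos heq.symm]
    norm_num
  | succ rem ih =>
    intro j hj n fuel hf
    obtain ⟨fuel, rfl⟩ : ∃ f, fuel = f + 1 := ⟨fuel - 1, by omega⟩
    have hjk : j < k := by omega
    have hne : (buildT 0 last).getD (p0+1+j) 0 ≠ tgt := by
      have := hfirst j (by simpa [List.length_drop] using by omega)
      rw [List.getElem_drop] at this
      rw [List.getD_eq_getElem _ _ (by omega)]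
      simpa using this
    have hr2ne : (buildT 0 last).getD (p0+1+j) 0 - tgt + r1 ≠ r1 := by
      intro h; apply hne; omega
    have hstep : (buildT 0 last).getD (p0+1+j+1) 0
        = (buildT 0 last).getD (p0+1+j) 0 + last.getD (p0+1+j) 0 + 1 :=
      buildT_step 0 last (p0+1+j) (by omega) 0
    have hcast : ((p0 + j : Nat) : Int) + 1 = ((p0 + (j+1) : Nat) : Int) := by push_cast; ring
    have hget : PySem.List.pyGetD last (((p0 + j : Nat) : Int) + 1) 0 = last.getD (p0+1+j) 0 := by
      rw [hcast, PySem.List.pyGetD_natCast]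
      congr 1; omega
    have := ih (j+1) (by omega) (n+1) fuel (by omega)
    rw [show p0+1+(j+1) = p0+1+j+1 from by omega] at this
    simp only [pyA_while, hget]
    rw [show (buildT 0 last).getD (p0+1+j) 0 - tgt + r1 + last.getD (p0+1+j) 0 + 1
        = (buildT 0 last).getD (p0+1+j+1) 0 - tgt + r1 from by omega, hcast, this]
    rw [if_neg (fun h => hr2ne h.symm)]
    simp only [Prod.mk.injEq]
    exact ⟨by push_cast; ring, trivial⟩

-- one non-last row: A's append loop equals B's prefix-sum + first-index loop
theorem rowLem (last : List Int) : ∀ (row : List Int) (p : Nat) (s : Int) (acc : List Int),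
    p ≤ last.length →
    s = (buildT 0 last).getD p 0 →
    rowMatches last row s p = true →
    pyA_row last (last.length + 1) row ((p : Nat) : Int) acc
      = acc ++ pyB_row (buildT 0 last) row s p := by
  intro row
  induction row with
  | nil => intro p s acc _ _ _; simp [pyA_row, pyB_row]
  | cons r1 rs ih =>
    intro p s acc hp hs hm
    set T := buildT 0 last with hT
    have hlenT : T.length = last.length + 1 := length_buildT 0 last
    unfold rowMatches at hm
    rw [find?_eq_index? last (s + r1 + 1) (last.length - p) p rfl hp] at hm
    cases hidx : PySem.List.index? (T.drop (p+1)) (s + r1 + 1) with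
    | none => rw [← hT, hidx] at hm; simp at hm
    | some k =>
      rw [← hT, hidx] at hm
      simp only [Option.map_some] at hm
      obtain ⟨hk, hval, hfirst⟩ := PySem.List.getElem_of_index?_eq_some hidx
      have hkT : p + 1 + k < T.length := by simp only [List.length_drop] at hk; omega
      have hplast : p < last.length := by omega
      have hstep : T.getD (p+1) 0 = T.getD p 0 + last.getD p 0 + 1 :=
        buildT_step 0 last p hplast 0
      have hTm : T.getD (p+1+k) 0 = s + r1 + 1 := by
        have := hval
        rw [List.getElem_drop] at this
        rw [List.getD_eq_getElem _ _ (by omega)]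
        simpa using this
      have hrec := ih (p+1+k) (s + r1 + 1) (acc ++ [((p+1+k : Nat) : Int) - (p : Nat) - 1])
        (by omega) hTm.symm hm
      have hr2 : PySem.List.pyGetD last ((p : Nat) : Int) 0 = last.getD p 0 := by
        rw [PySem.List.pyGetD_natCast]
      simp only [pyA_row, pyB_row, hidx, hr2]
      by_cases hcase : r1 = last.getD p 0
      · -- A's 'if r1 == r2' branch; then T[p+1] is the target, so k = 0
        have hk0 : k = 0 := by
          have hdrop : T.drop (p+1) = T[p+1]'(by omega) :: T.drop (p+2) :=
            List.drop_eq_getElem_cons (by omega)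
          have hTp1 : T[p+1]'(by omega) = s + r1 + 1 := by
            rw [← List.getD_eq_getElem T 0 (by omega)]; omega
          rw [hdrop, hTp1, PySem.List.index?_cons_self] at hidx
          simpa using hidx.symm
        subst hk0
        rw [if_pos hcase]
        have h0 : ((p+1+0 : Nat) : Int) - ((p : Nat) : Int) - 1 = 0 := by push_cast; ring
        rw [h0] at hrec ⊢
        have hcast : ((p : Nat) : Int) + 1 = ((p + 1 + 0 : Nat) : Int) := by push_cast; ring
        rw [hcast, hrec]
        simp
      · rw [if_neg hcase]
        have hw := whileLem last r1 (s + r1 + 1) p k hidx k 0 (by omega) 0 (last.length + 1)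
          (by omega)
        simp only [Nat.add_zero] at hw
        have hinit : T.getD (p+1) 0 - (s + r1 + 1) + r1 = last.getD p 0 := by omega
        rw [hinit] at hw
        rw [hw]
        have hcast : ((p + k : Nat) : Int) + 1 = ((p + 1 + k : Nat) : Int) := by push_cast; ring
        have h1 : (0 : Int) + (k : Int) = ((p+1+k : Nat) : Int) - ((p : Nat) : Int) - 1 := by
          push_cast; ring
        rw [hcast, h1, hrec]
        simp

-- the enumerate loop of A equals B's map-over-dropLast plus the final zero row
theorem goLem (nr : List Int) : ∀ (l : List (List Int)), l ≠ [] →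
    (∀ row ∈ l.dropLast, rowMatches nr row 0 0 = true) →
    repA_go nr l = l.dropLast.map (fun row => pyB_row (buildT 0 nr) row 0 0)
      ++ [List.replicate nr.length 0] := by
  intro l
  induction l with
  | nil => intro h; exact absurd rfl h
  | cons x xs ih =>
    intro _ hrows
    cases xs with
    | nil => simp [repA_go]
    | cons y ys =>
      have hx : rowMatches nr x 0 0 = true := hrows x (by simp)
      have hA := rowLem nr x 0 0 [] (by omega) (by rw [buildT_getD_zero]) hx
      simp only [Nat.cast_zero] at hA
      simp only [repA_go, List.dropLast_cons_of_ne_nil (by simp : y :: ys ≠ []), List.map_cons]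
      rw [hA, ih (by simp) (fun row hr => hrows row (by
        simp [List.dropLast_cons_of_ne_nil (by simp : y :: ys ≠ [])] at hr ⊢
        exact Or.inr hr))]
      simp

-- ===== VERDICT (by name: the statement is the Claim_ definition above) =====
theorem repeating_map_py_spec : Claim_equal_repeating_map_py := by
  intro mb _ hpre
  unfold Spec_repeating_map_py
  cases mb with
  | nil => rfl
  | cons x xs =>
    have hne : (x :: xs) ≠ [] := by simp
    have hlast : (x :: xs).getLast? = some ((x :: xs).getLast hne) :=
      List.getLast?_eq_some_getLast hne
    have hneg : PySem.List.pyGetD (x :: xs) (-1) [] = (x :: xs).getLast hne :=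
      PySem.List.pyGetD_neg_one _ [] hne
    unfold Pre_repeating_map_py at hpre
    rw [hlast] at hpre
    simp only [Option.getD_some] at hpre
    show repA_go (PySem.List.pyGetD (x :: xs) (-1) []) (x :: xs) = _
    rw [hneg, goLem _ (x :: xs) hne hpre]
    unfold repeating_map_py_alt
    rw [hlast]
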